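-- pv_equiv track=rewrite | github.com/cvsper/Akali | extended/ad/ntlm.py | _validate_ntlm_hash
-- ===== SOURCE A (Python) =====
-- def _validate_ntlm_hash(ntlm_hash: str) -> bool:
--     """Validate NTLM hash format.
--
--     Args:
--         ntlm_hash: Hash to validate (LM:NTLM or just NTLM)
--
--     Returns:
--         True if valid format
--     """
--     # Check for LM:NTLM format (32:32 hex chars)
--     if ':' in ntlm_hash:
--         parts = ntlm_hash.split(':')
--         if len(parts) == 2:
--             return (
--                 len(parts[0]) == 32 and
--                 len(parts[1]) == 32 and
--                 all(c in '0123456789abcdefABCDEF' for c in parts[0]) and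
--                 all(c in '0123456789abcdefABCDEF' for c in parts[1])
--             )
--
--     # Check for just NTLM (32 hex chars)
--     return (
--         len(ntlm_hash) == 32 and
--         all(c in '0123456789abcdefABCDEF' for c in ntlm_hash)
--     )
-- ===== SOURCE B (Python) =====
-- HEX = "0123456789abcdefABCDEF"
--
--
-- def _validate_ntlm_hash(ntlm_hash: str) -> bool:
--     """Validate NTLM hash format by length dispatch: a bare NTLM hash is
--     exactly 32 hex chars; an LM:NTLM pair is exactly 65 chars with the
--     colon at position 32 and hex on both sides."""
--     if len(ntlm_hash) == 32:
--         return all(c in HEX for c in ntlm_hash)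
--     if len(ntlm_hash) == 65 and ntlm_hash[32] == ':':
--         return (all(c in HEX for c in ntlm_hash[:32]) and
--                 all(c in HEX for c in ntlm_hash[33:]))
--     return False
-- ===== Notes on version B (the rewrite author's own statement) =====
-- stated objective: simpler
-- what changed: Replaces the split-on-colon / list-of-parts logic with a direct length dispatch: a valid hash is either exactly 32 hex chars, or exactly 65 chars with a colon at index 32 and hex digits on both sides, so no split pass and no substring search is needed.
import Mathlib
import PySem

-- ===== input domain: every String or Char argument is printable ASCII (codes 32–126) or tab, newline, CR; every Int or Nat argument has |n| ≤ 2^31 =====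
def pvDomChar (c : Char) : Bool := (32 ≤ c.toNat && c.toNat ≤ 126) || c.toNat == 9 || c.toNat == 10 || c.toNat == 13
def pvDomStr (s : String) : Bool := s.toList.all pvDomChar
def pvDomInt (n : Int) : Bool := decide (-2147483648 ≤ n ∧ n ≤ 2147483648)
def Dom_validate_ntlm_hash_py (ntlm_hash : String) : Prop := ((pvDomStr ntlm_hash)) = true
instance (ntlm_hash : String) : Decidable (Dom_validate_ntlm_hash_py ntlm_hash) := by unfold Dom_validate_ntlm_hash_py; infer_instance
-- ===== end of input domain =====

-- B replaces A's split-on-colon logic by a direct length dispatch (32 hex chars, or 65 chars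
-- with ':' at index 32 and hex on both sides); objective: simpler, no split pass.


-- ===== PORT A =====
def validate_ntlm_hash_py (ntlm_hash : String) : Bool :=
  -- if ':' in ntlm_hash:
  if PySem.Chars.isIn [':'] ntlm_hash.toList then
    -- parts = ntlm_hash.split(':')
    let parts := PySem.Chars.splitOn ntlm_hash.toList [':']
    if parts.length == 2 then
      -- len(parts[0]) == 32 and len(parts[1]) == 32 and all(...) and all(...)
      (PySem.List.pyGetD parts 0 []).length == 32 &&
      ((PySem.List.pyGetD parts 1 []).length == 32 &&
       ((PySem.List.pyGetD parts 0 []).all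
          (fun c => PySem.Chars.isIn [c] "0123456789abcdefABCDEF".toList) &&
        (PySem.List.pyGetD parts 1 []).all
          (fun c => PySem.Chars.isIn [c] "0123456789abcdefABCDEF".toList)))
    else
      -- fall through: len(ntlm_hash) == 32 and all(...)
      ntlm_hash.toList.length == 32 &&
      ntlm_hash.toList.all (fun c => PySem.Chars.isIn [c] "0123456789abcdefABCDEF".toList)
  else
    ntlm_hash.toList.length == 32 &&
    ntlm_hash.toList.all (fun c => PySem.Chars.isIn [c] "0123456789abcdefABCDEF".toList)

-- ===== PORT B =====
-- HEX = "0123456789abcdefABCDEF"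
def pvHEX : List Char := "0123456789abcdefABCDEF".toList

def validate_ntlm_hash_py_alt (ntlm_hash : String) : Bool :=
  if ntlm_hash.toList.length == 32 then
    ntlm_hash.toList.all (fun c => PySem.Chars.isIn [c] pvHEX)
  else if ntlm_hash.toList.length == 65 &&
          (PySem.List.pyGet? ntlm_hash.toList 32 == some ':') then
    (PySem.List.slice ntlm_hash.toList none (some 32)).all
      (fun c => PySem.Chars.isIn [c] pvHEX) &&
    (PySem.List.slice ntlm_hash.toList (some 33) none).all
      (fun c => PySem.Chars.isIn [c] pvHEX)
  else
    false

-- ===== PRECONDITION & SPEC =====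
def Spec_validate_ntlm_hash_py (ntlm_hash : String) (out : Bool) : Prop := out = validate_ntlm_hash_py_alt ntlm_hash
instance (ntlm_hash : String) (out : Bool) : Decidable (Spec_validate_ntlm_hash_py ntlm_hash out) := by unfold Spec_validate_ntlm_hash_py; infer_instance

-- ===== CLAIM (what is proved, stated in full; the proofs are below) =====
def Claim_equal_validate_ntlm_hash_py : Prop := ∀ (ntlm_hash : String), Dom_validate_ntlm_hash_py ntlm_hash → Spec_validate_ntlm_hash_py ntlm_hash (validate_ntlm_hash_py ntlm_hash)

-- ===== LEMMAS AND PROOFS =====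

-- a plain structural single-character split, used to reason about PySem.Chars.splitOn
def pvSplitC (s : Char) : List Char → List (List Char)
  | [] => [[]]
  | c :: t =>
    if c = s then [] :: pvSplitC s t
    else
      match pvSplitC s t with
      | [] => [[c]]
      | h :: tl => (c :: h) :: tl

def pvConsHead (pre : List Char) : List (List Char) → List (List Char)
  | [] => [pre]
  | h :: t => (pre ++ h) :: t

theorem pvSplitC_ne_nil (s : Char) (l : List Char) : pvSplitC s l ≠ [] := by
  cases l with
  | nil => simp [pvSplitC]
  | cons c t =>
    simp only [pvSplitC]
    split_ifs
    · simp
    · cases h : pvSplitC s t <;> simp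

theorem pv_go_spec (s : Char) (l : List Char) : ∀ (fuel : Nat) (cur : List Char)
    (acc : List (List Char)), l.length ≤ fuel →
    PySem.Chars.splitOn.go [s] (fuel + 1) l cur acc
      = acc.reverse ++ pvConsHead cur.reverse (pvSplitC s l) := by
  induction l with
  | nil =>
    intro fuel cur acc _
    simp [PySem.Chars.splitOn.go, pvSplitC, pvConsHead]
  | cons c t ih =>
    intro fuel cur acc h
    simp only [List.length_cons] at h
    obtain ⟨f, rfl⟩ : ∃ f, fuel = f + 1 := ⟨fuel - 1, by omega⟩
    rw [PySem.Chars.splitOn.go]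
    by_cases hcs : c = s
    · subst hcs
      have hpre : List.isPrefixOf [c] (c :: t) = true := by simp [List.isPrefixOf]
      simp only [hpre, if_true, List.length_cons, List.length_nil, List.drop_succ_cons,
        List.drop_zero]
      rw [ih f [] (cur.reverse :: acc) (by omega)]
      cases hsp : pvSplitC c t with
      | nil => exact absurd hsp (pvSplitC_ne_nil c t)
      | cons h0 tl => simp [pvSplitC, pvConsHead, hsp]
    · have hpre : List.isPrefixOf [s] (c :: t) = false := by
        simp [List.isPrefixOf]
        exact fun h => absurd h.symm hcs
      simp only [hpre, Bool.false_eq_true, if_false]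
      rw [ih f (c :: cur) acc (by omega)]
      cases hsp : pvSplitC s t with
      | nil => exact absurd hsp (pvSplitC_ne_nil s t)
      | cons h0 tl => simp [pvSplitC, pvConsHead, hsp, hcs]

theorem pv_splitOn_eq (s : Char) (l : List Char) :
    PySem.Chars.splitOn l [s] = pvSplitC s l := by
  unfold PySem.Chars.splitOn
  rw [pv_go_spec s l l.length [] [] (le_refl _)]
  cases hsp : pvSplitC s l with
  | nil => exact absurd hsp (pvSplitC_ne_nil s l)
  | cons h tl => simp [pvConsHead]

theorem pv_length_pvSplitC (s : Char) (l : List Char) :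
    (pvSplitC s l).length = l.count s + 1 := by
  induction l with
  | nil => simp [pvSplitC]
  | cons c t ih =>
    simp only [pvSplitC]
    by_cases h : c = s
    · subst h; simp [ih]
    · cases hsp : pvSplitC s t with
      | nil => exact absurd hsp (pvSplitC_ne_nil s t)
      | cons h0 tl =>
        rw [hsp] at ih
        simp [h] at ih ⊢
        omega

theorem pv_pvSplitC_singleton {s : Char} {l q : List Char} (h : pvSplitC s l = [q]) :
    l = q ∧ s ∉ q := by
  induction l generalizing q with
  | nil =>
    simp [pvSplitC] at h
    subst h
    exact ⟨rfl, by simp⟩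
  | cons c t ih =>
    simp only [pvSplitC] at h
    by_cases hcs : c = s
    · rw [if_pos hcs] at h
      simp at h
      exact absurd h.2 (pvSplitC_ne_nil s t)
    · rw [if_neg hcs] at h
      cases hsp : pvSplitC s t with
      | nil => exact absurd hsp (pvSplitC_ne_nil s t)
      | cons h0 tl =>
        rw [hsp] at h
        simp at h
        obtain ⟨rfl, rfl⟩ := h
        obtain ⟨rfl, hnotin⟩ := ih hsp
        exact ⟨rfl, by simp [hnotin, Ne.symm hcs]⟩

theorem pv_pvSplitC_pair {s : Char} {l p q : List Char} (h : pvSplitC s l = [p, q]) :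
    l = p ++ s :: q ∧ s ∉ p ∧ s ∉ q := by
  induction l generalizing p q with
  | nil => simp [pvSplitC] at h
  | cons c t ih =>
    simp only [pvSplitC] at h
    by_cases hcs : c = s
    · rw [if_pos hcs] at h
      simp at h
      obtain ⟨rfl, hq⟩ := h
      obtain ⟨rfl, hnotin⟩ := pv_pvSplitC_singleton hq
      exact ⟨by simp [hcs], by simp, hnotin⟩
    · rw [if_neg hcs] at h
      cases hsp : pvSplitC s t with
      | nil => exact absurd hsp (pvSplitC_ne_nil s t)
      | cons h0 tl =>
        rw [hsp] at h
        simp at h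
        obtain ⟨⟨rfl, rfl⟩, rfl⟩ := h
        obtain ⟨rfl, hp0, hq⟩ := ih hsp
        exact ⟨by simp, by simp [hp0, Ne.symm hcs], hq⟩

theorem pv_isIn_singleton (c : Char) (l : List Char) :
    PySem.Chars.isIn [c] l = true ↔ c ∈ l := by
  rw [PySem.Chars.isIn_iff_infix]
  constructor
  · intro h
    exact List.singleton_sublist.mp h.sublist
  · intro h
    obtain ⟨u, v, rfl⟩ := List.append_of_mem h
    exact ⟨u, v, by simp⟩

theorem pv_all_hex_false {l : List Char} (h : ':' ∈ l) :
    l.all (fun c => PySem.Chars.isIn [c] pvHEX) = false := by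
  rw [List.all_eq_false]
  exact ⟨':', h, by decide⟩

theorem pv_pyGet32 (l : List Char) : PySem.List.pyGet? l (32 : Int) = l[32]? := by
  simpa using PySem.List.pyGet?_natCast l 32

theorem pv_core (l : List Char) :
    (if PySem.Chars.isIn [':'] l then
      if (PySem.Chars.splitOn l [':']).length == 2 then
        (PySem.List.pyGetD (PySem.Chars.splitOn l [':']) 0 []).length == 32 &&
        ((PySem.List.pyGetD (PySem.Chars.splitOn l [':']) 1 []).length == 32 &&
         ((PySem.List.pyGetD (PySem.Chars.splitOn l [':']) 0 []).all
            (fun c => PySem.Chars.isIn [c] pvHEX) &&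
          (PySem.List.pyGetD (PySem.Chars.splitOn l [':']) 1 []).all
            (fun c => PySem.Chars.isIn [c] pvHEX)))
      else
        l.length == 32 && l.all (fun c => PySem.Chars.isIn [c] pvHEX)
    else
      l.length == 32 && l.all (fun c => PySem.Chars.isIn [c] pvHEX)) =
    (if l.length == 32 then
      l.all (fun c => PySem.Chars.isIn [c] pvHEX)
    else if l.length == 65 && (PySem.List.pyGet? l 32 == some ':') then
      (PySem.List.slice l none (some 32)).all (fun c => PySem.Chars.isIn [c] pvHEX) &&
      (PySem.List.slice l (some 33) none).all (fun c => PySem.Chars.isIn [c] pvHEX)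
    else false) := by
  by_cases hc : ':' ∈ l
  · rw [if_pos ((pv_isIn_singleton ':' l).mpr hc)]
    simp only [pv_splitOn_eq]
    rcases hparts : pvSplitC ':' l with _ | ⟨p, _ | ⟨q, _ | ⟨r, rs⟩⟩⟩
    · exact absurd hparts (pvSplitC_ne_nil ':' l)
    · -- one part would mean no colon, contradicting hc
      obtain ⟨rfl, hnotin⟩ := pv_pvSplitC_singleton hparts
      exact absurd hc hnotin
    · -- exactly two parts: l = p ++ ':' :: q with no colon in p or q
      obtain ⟨rfl, hp, hq⟩ := pv_pvSplitC_pair hparts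
      rw [if_pos (by rfl)]
      have hg0 : PySem.List.pyGetD [p, q] 0 [] = p := rfl
      have hg1 : PySem.List.pyGetD [p, q] 1 [] = q := rfl
      rw [hg0, hg1]
      have hcmem : ':' ∈ p ++ ':' :: q := by simp
      by_cases hp32 : p.length = 32
      · by_cases hq32 : q.length = 32
        · -- the valid-shape case: length 65, colon at 32
          have h65 : (p ++ ':' :: q).length = 65 := by simp [hp32, hq32]
          have hget : (p ++ ':' :: q)[32]? = some ':' := by
            rw [List.getElem?_append_right (by omega)]
            simp [hp32]
          have htake : PySem.List.slice (p ++ ':' :: q) none (some 32) = p := by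
            rw [(PySem.List.slice_to _ (by norm_num) :
              PySem.List.slice (p ++ ':' :: q) none (some 32)
                = (p ++ ':' :: q).take ((32:Int).toNat))]
            rw [show ((32:Int).toNat) = 32 from rfl]
            exact List.take_left' hp32
          have hdrop : PySem.List.slice (p ++ ':' :: q) (some 33) none = q := by
            rw [(PySem.List.slice_from _ (by norm_num) :
              PySem.List.slice (p ++ ':' :: q) (some 33) none
                = (p ++ ':' :: q).drop ((33:Int).toNat))]
            rw [show ((33:Int).toNat) = 33 from rfl]
            rw [show (33:ℕ) = p.length + 1 by omega, List.drop_append]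
            simp
          simp [h65, htake, hdrop, hp32, hq32]
        · -- q has the wrong length: both sides false
          rw [if_neg (by
            simp only [beq_iff_eq, List.length_append, List.length_cons, hp32]
            omega)]
          rw [if_neg (by
            simp only [Bool.and_eq_true, beq_iff_eq, List.length_append, List.length_cons, hp32]
            rintro ⟨h65eq, -⟩
            omega)]
          simp [hq32]
      · -- p has the wrong length: both sides false
        have hget : (p ++ ':' :: q)[32]? ≠ some ':' := by
          rcases Nat.lt_or_ge p.length 32 with hlt | hge
          · rw [List.getElem?_append_right (by omega)]
            obtain ⟨k, hk⟩ : ∃ k, 32 - p.length = k + 1 := ⟨31 - p.length, by omega⟩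
            rw [hk, List.getElem?_cons_succ]
            rcases hqk : q[k]? with _ | x
            · simp
            · simp only [ne_eq, Option.some.injEq]
              intro hcol
              exact hq (hcol ▸ List.mem_of_getElem? hqk)
          · have hgt : 32 < p.length := lt_of_le_of_ne hge (Ne.symm hp32)
            rw [List.getElem?_append_left (by omega)]
            rw [List.getElem?_eq_getElem (by omega)]
            simp only [ne_eq, Option.some.injEq]
            intro hcol
            exact hp (hcol ▸ List.getElem_mem _)
        have hcolhex : PySem.Chars.isIn [':'] pvHEX = false := by decide
        by_cases h32 : (p ++ ':' :: q).length = 32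
        · simp [hp32, h32, pv_all_hex_false hcmem]
        · simp [hp32, pv_pyGet32, hget, hcolhex]
    · -- three or more parts: at least two colons, both sides false
      have hcount : 2 ≤ l.count ':' := by
        have hlen := pv_length_pvSplitC ':' l
        rw [hparts] at hlen
        simp at hlen
        omega
      rw [if_neg (by simp)]
      rw [pv_all_hex_false hc, Bool.and_false]
      symm
      by_cases h32 : l.length = 32
      · simp [h32]
      · rw [if_neg (by simp [h32])]
        by_cases hcond : (l.length == 65 && (PySem.List.pyGet? l 32 == some ':')) = true
        · rw [if_pos hcond]
          simp only [Bool.and_eq_true, beq_iff_eq] at hcond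
          obtain ⟨h65, hget⟩ := hcond
          rw [pv_pyGet32] at hget
          have hlt : 32 < l.length := by omega
          have hgetv : l[32] = ':' := by
            rw [List.getElem?_eq_getElem hlt] at hget
            exact Option.some.inj hget
          have hdec : l = l.take 32 ++ l[32] :: l.drop 33 := by
            conv_lhs => rw [← List.take_append_drop 32 l]
            congr 1
            exact List.drop_eq_getElem_cons hlt
          have hcnt : l.count ':' = (l.take 32).count ':' + (l.drop 33).count ':' + 1 := by
            conv_lhs => rw [hdec]
            simp [List.count_append, hgetv]
            omega
          have hslice_t : PySem.List.slice l none (some 32) = l.take 32 := by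
            rw [(PySem.List.slice_to _ (by norm_num) :
              PySem.List.slice l none (some 32) = l.take ((32:Int).toNat))]
            rw [show ((32:Int).toNat) = 32 from rfl]
          have hslice_d : PySem.List.slice l (some 33) none = l.drop 33 := by
            rw [(PySem.List.slice_from _ (by norm_num) :
              PySem.List.slice l (some 33) none = l.drop ((33:Int).toNat))]
            rw [show ((33:Int).toNat) = 33 from rfl]
          rw [hslice_t, hslice_d]
          rcases Nat.lt_or_ge 0 ((l.take 32).count ':') with hpos | hz
          · rw [pv_all_hex_false (List.count_pos_iff.mp hpos)]
            simp
          · have hdpos : 0 < (l.drop 33).count ':' := by omega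
            rw [pv_all_hex_false (List.count_pos_iff.mp hdpos)]
            simp
        · rw [if_neg hcond]
  · -- no colon anywhere
    rw [if_neg (by simp [pv_isIn_singleton, hc])]
    by_cases h32 : l.length = 32
    · simp [h32]
    · have hcond : (l.length == 65 && (PySem.List.pyGet? l 32 == some ':')) = false := by
        by_cases h65 : l.length = 65
        · have hne : l[32]? ≠ some ':' := by
            rw [List.getElem?_eq_getElem (by omega)]
            simp only [ne_eq, Option.some.injEq]
            exact fun hcol => hc (hcol ▸ List.getElem_mem (by omega))
          simp [pv_pyGet32, hne]
        · simp [h65]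
      simp [h32, hcond]

theorem pv_ports_eq (s : String) :
    validate_ntlm_hash_py s = validate_ntlm_hash_py_alt s := by
  unfold validate_ntlm_hash_py validate_ntlm_hash_py_alt
  have := pv_core s.toList
  simpa [pvHEX] using this

-- ===== VERDICT (by name: the statement is the Claim_ definition above) =====
theorem validate_ntlm_hash_py_spec : Claim_equal_validate_ntlm_hash_py := by
  intro s _
  unfold Spec_validate_ntlm_hash_py
  exact pv_ports_eq s
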